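-- pv_equiv track=rewrite | github.com/Jackzhuang123/chat-agent | core/agent_middlewares.py | _inject_context_before_last_user
-- ===== SOURCE A (Python) =====
-- from typing import Any, Dict, List, Optional, Tuple
--
-- def _inject_context_before_last_user(
--     messages: List[Dict[str, str]],
--     context_message: Dict[str, str],
-- ) -> List[Dict[str, str]]:
--     """将上下文消息插入到最后一个用户消息前，保持上下文就近可见。"""
--     updated = list(messages)
--     for idx in range(len(updated) - 1, -1, -1):
--         if updated[idx].get("role") == "user":
--             updated.insert(idx, context_message)
--             return updated
--     updated.append(context_message)
--     return updated
-- ===== SOURCE B (Python) =====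
-- from typing import Dict, List
--
--
-- def _inject_context_before_last_user(
--     messages: List[Dict[str, str]],
--     context_message: Dict[str, str],
-- ) -> List[Dict[str, str]]:
--     """Build the output back-to-front: walk the messages in reverse, emitting each
--     one, and right after the first user message seen (i.e. the last user message
--     overall) emit the context; reverse the buffer at the end, appending the
--     context if no user message was ever seen."""
--     out = []
--     injected = False
--     for msg in reversed(messages):
--         out.append(msg)
--         if not injected and msg.get("role") == "user":
--             out.append(context_message)
--             injected = True
--     out.reverse()
--     if not injected:
--         out.append(context_message)
--     return out
-- ===== Notes on version B (the rewrite author's own statement) =====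
-- stated objective: alternative
-- what changed: Builds the output back-to-front: a single reverse pass emits every message into a buffer and emits the context right after the first user message seen, then reverses the buffer (appending the context if no user exists), instead of A's indexed reverse scan with early-exit and in-place list.insert.
import Mathlib
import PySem

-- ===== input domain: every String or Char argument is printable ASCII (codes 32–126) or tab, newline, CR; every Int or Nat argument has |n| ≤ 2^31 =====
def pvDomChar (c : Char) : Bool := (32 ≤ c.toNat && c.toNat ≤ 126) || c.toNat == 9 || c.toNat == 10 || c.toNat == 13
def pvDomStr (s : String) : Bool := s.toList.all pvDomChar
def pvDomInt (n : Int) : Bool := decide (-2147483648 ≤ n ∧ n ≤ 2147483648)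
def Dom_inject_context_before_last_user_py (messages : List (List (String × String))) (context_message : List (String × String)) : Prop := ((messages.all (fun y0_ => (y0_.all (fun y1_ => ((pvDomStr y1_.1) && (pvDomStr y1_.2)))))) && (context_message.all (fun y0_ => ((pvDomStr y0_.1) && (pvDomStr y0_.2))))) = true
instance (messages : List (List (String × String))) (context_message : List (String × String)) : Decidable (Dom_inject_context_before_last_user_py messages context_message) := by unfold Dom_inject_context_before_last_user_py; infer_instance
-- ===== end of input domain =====

-- B builds the output back-to-front (one reverse pass appending into a buffer with an
-- 'injected' flag, then one final reverse) instead of A's indexed reverse scan with an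
-- early-exit in-place insert; same cost, different construction.
-- A copies `messages` first, so neither program mutates its argument observably.

-- ===== PORT A =====
-- the `for idx in range(len(updated)-1, -1, -1)` loop with early return: recursion on the
-- remaining count, reading index i at state i+1; falling out of the loop (state 0) appends.
def aScan (updated : List (List (String × String))) (context_message : List (String × String)) : Nat → List (List (String × String))
  | 0 => updated ++ [context_message]
  | i + 1 =>
    if (PySem.List.pyGetD updated (i : Int) []).lookup "role" == some "user" then
      PySem.List.insert updated (i : Int) context_message
    else aScan updated context_message i

def inject_context_before_last_user_py (messages : List (List (String × String))) (context_message : List (String × String)) : List (List (String × String)) :=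
  aScan messages context_message messages.length

-- ===== PORT B =====
-- the `for msg in reversed(messages)` loop as a foldl over messages.reverse carrying
-- (out, injected); out.append is `++ [·]`, the final out.reverse / conditional append follow.
def inject_context_before_last_user_py_alt (messages : List (List (String × String))) (context_message : List (String × String)) : List (List (String × String)) :=
  let p := messages.reverse.foldl
    (fun (st : List (List (String × String)) × Bool) msg =>
      if !st.2 && (msg.lookup "role" == some "user") then
        (st.1 ++ [msg] ++ [context_message], true)
      else (st.1 ++ [msg], st.2)) ([], false)
  if !p.2 then p.1.reverse ++ [context_message] else p.1.reverse

-- ===== PRECONDITION & SPEC =====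
def Spec_inject_context_before_last_user_py (messages : List (List (String × String))) (context_message : List (String × String)) (out : List (List (String × String))) : Prop := out = inject_context_before_last_user_py_alt messages context_message
instance (messages : List (List (String × String))) (context_message : List (String × String)) (out : List (List (String × String))) : Decidable (Spec_inject_context_before_last_user_py messages context_message out) := by unfold Spec_inject_context_before_last_user_py; infer_instance

-- ===== CLAIM (what is proved, stated in full; the proofs are below) =====
def Claim_equal_inject_context_before_last_user_py : Prop := ∀ (messages : List (List (String × String))) (context_message : List (String × String)), Dom_inject_context_before_last_user_py messages context_message → Spec_inject_context_before_last_user_py messages context_message (inject_context_before_last_user_py messages context_message)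

-- ===== LEMMAS AND PROOFS =====

-- greatest index j < i whose message has role "user" (reading exactly as A's port does)
def lastU (ms : List (List (String × String))) : Nat → Option Nat
  | 0 => none
  | i + 1 =>
    if (PySem.List.pyGetD ms (i : Int) []).lookup "role" == some "user" then some i
    else lastU ms i

theorem pyGetD_append_lt (ms : List (List (String × String))) (m : List (String × String)) (i : Nat) (h : i < ms.length) :
    PySem.List.pyGetD (ms ++ [m]) (i : Int) [] = PySem.List.pyGetD ms (i : Int) [] := by
  rw [PySem.List.pyGetD_natCast, PySem.List.pyGetD_natCast]
  simp [List.getD, List.getElem?_append_left h]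

theorem lastU_append (ms : List (List (String × String))) (m : List (String × String)) (i : Nat) (hi : i ≤ ms.length) :
    lastU (ms ++ [m]) i = lastU ms i := by
  induction i with
  | zero => rfl
  | succ k ih =>
    unfold lastU
    rw [pyGetD_append_lt ms m k (by omega), ih (by omega)]

theorem aScan_char (ms : List (List (String × String))) (ctx : List (String × String)) (i : Nat) (hi : i ≤ ms.length) :
    aScan ms ctx i =
      match lastU ms i with
      | some j => ms.take j ++ ctx :: ms.drop j
      | none => ms ++ [ctx] := by
  induction i with
  | zero => rfl
  | succ k ih =>
    unfold aScan lastU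
    by_cases h : ((PySem.List.pyGetD ms (k : Int) []).lookup "role" == some "user") = true
    · simp only [h, if_true]
      exact PySem.List.insert_natCast ms k ctx (by omega)
    · simp only [Bool.not_eq_true] at h
      simp only [h, Bool.false_eq_true, if_false]
      exact ih (by omega)

-- index of the FIRST user message (structural recursion; used to read B's reverse pass)
def firstU (ms : List (List (String × String))) : Option Nat :=
  match ms with
  | [] => none
  | m :: t => if m.lookup "role" == some "user" then some 0 else (firstU t).map (· + 1)

theorem firstU_cons (m : List (String × String)) (t : List (List (String × String))) :
    firstU (m :: t) = if m.lookup "role" == some "user" then some 0 else (firstU t).map (· + 1) := rfl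

theorem firstU_lt (ms : List (List (String × String))) (k : Nat) (h : firstU ms = some k) : k < ms.length := by
  induction ms generalizing k with
  | nil => simp [firstU] at h
  | cons m t ih =>
    rw [List.length_cons]
    rw [firstU_cons] at h
    split at h
    · injection h with h'; omega
    · cases hk : firstU t with
      | none => rw [hk] at h; simp at h
      | some k' =>
        rw [hk] at h
        simp only [Option.map_some, Option.some.injEq] at h
        have := ih k' hk
        omega

-- reading lastU at full length through the reverse: last user of ms = first user of ms.reverse
theorem lastU_firstU (ms : List (List (String × String))) :
    lastU ms ms.length = (firstU ms.reverse).map (fun k => ms.length - 1 - k) := by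
  induction ms using List.reverseRecOn with
  | nil => rfl
  | append_singleton t m ih =>
    have hlen : (t ++ [m]).length = t.length + 1 := by simp
    rw [hlen]
    unfold lastU
    have hget : PySem.List.pyGetD (t ++ [m]) (t.length : Int) [] = m := by
      rw [PySem.List.pyGetD_natCast]; simp [List.getD]
    rw [hget, lastU_append t m t.length (le_refl _), ih]
    have hrev : (t ++ [m]).reverse = m :: t.reverse := by simp
    rw [hrev, firstU_cons]
    by_cases h : (m.lookup "role" == some "user") = true
    · simp [h]
    · simp only [Bool.not_eq_true] at h
      simp only [h, Bool.false_eq_true, if_false]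
      cases hk : firstU t.reverse with
      | none => simp
      | some k =>
        have hklt : k < t.length := by
          have := firstU_lt t.reverse k hk
          simpa using this
        simp only [Option.map_some]
        congr 1
        omega

-- B's fold, read structurally: with the flag set it copies; with it clear it copies until
-- the first user message and emits ctx right after it.
theorem foldB_acc (ctx : List (String × String)) (l : List (List (String × String)))
    (acc : List (List (String × String))) (b : Bool) :
    l.foldl (fun (st : List (List (String × String)) × Bool) msg =>
      if !st.2 && (msg.lookup "role" == some "user") then
        (st.1 ++ [msg] ++ [ctx], true)
      else (st.1 ++ [msg], st.2)) (acc, b)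
    = (acc ++ (l.foldl (fun (st : List (List (String × String)) × Bool) msg =>
        if !st.2 && (msg.lookup "role" == some "user") then
          (st.1 ++ [msg] ++ [ctx], true)
        else (st.1 ++ [msg], st.2)) ([], b)).1,
       (l.foldl (fun (st : List (List (String × String)) × Bool) msg =>
        if !st.2 && (msg.lookup "role" == some "user") then
          (st.1 ++ [msg] ++ [ctx], true)
        else (st.1 ++ [msg], st.2)) ([], b)).2) := by
  induction l generalizing acc b with
  | nil => simp
  | cons m t ih =>
    simp only [List.foldl_cons]
    by_cases h : (!b && (m.lookup "role" == some "user")) = true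
    · simp only [h, if_true]
      rw [ih (acc ++ [m] ++ [ctx]) true, ih ([] ++ [m] ++ [ctx]) true]
      simp
    · simp only [Bool.not_eq_true] at h
      simp only [h, Bool.false_eq_true, if_false]
      rw [ih (acc ++ [m]) b, ih ([] ++ [m]) b]
      simp

theorem foldB_true (ctx : List (String × String)) (l : List (List (String × String))) :
    l.foldl (fun (st : List (List (String × String)) × Bool) msg =>
      if !st.2 && (msg.lookup "role" == some "user") then
        (st.1 ++ [msg] ++ [ctx], true)
      else (st.1 ++ [msg], st.2)) ([], true) = (l, true) := by
  induction l with
  | nil => rfl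
  | cons m t ih =>
    simp only [List.foldl_cons, Bool.not_true, Bool.false_and, Bool.false_eq_true, if_false]
    rw [foldB_acc ctx t ([] ++ [m]) true, ih]
    simp

theorem foldB_false (ctx : List (String × String)) (l : List (List (String × String))) :
    l.foldl (fun (st : List (List (String × String)) × Bool) msg =>
      if !st.2 && (msg.lookup "role" == some "user") then
        (st.1 ++ [msg] ++ [ctx], true)
      else (st.1 ++ [msg], st.2)) ([], false)
    = match firstU l with
      | some k => (l.take (k + 1) ++ ctx :: l.drop (k + 1), true)
      | none => (l, false) := by
  induction l with
  | nil => rfl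
  | cons m t ih =>
    simp only [List.foldl_cons, Bool.not_false, Bool.true_and]
    unfold firstU
    by_cases h : (m.lookup "role" == some "user") = true
    · simp only [h, if_true]
      rw [foldB_acc ctx t ([] ++ [m] ++ [ctx]) true, foldB_true]
      simp
    · simp only [Bool.not_eq_true] at h
      simp only [h, Bool.false_eq_true, if_false]
      rw [foldB_acc ctx t ([] ++ [m]) false, ih]
      cases hk : firstU t with
      | none => simp
      | some k => simp

-- ===== VERDICT (by name: the statement is the Claim_ definition above) =====
theorem inject_context_before_last_user_py_spec : Claim_equal_inject_context_before_last_user_py := by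
  intro messages context_message _
  unfold Spec_inject_context_before_last_user_py inject_context_before_last_user_py inject_context_before_last_user_py_alt
  rw [aScan_char messages context_message messages.length (le_refl _), lastU_firstU]
  simp only [foldB_false]
  cases hk : firstU messages.reverse with
  | none => simp
  | some k =>
    have hklt : k < messages.length := by
      have := firstU_lt messages.reverse k hk
      simpa using this
    have hj : messages.length - (k + 1) = messages.length - 1 - k := by omega
    have h1 : (messages.reverse.drop (k + 1)).reverse = messages.take (messages.length - 1 - k) := by
      rw [List.drop_reverse]; simp [hj]
    have h2 : (messages.reverse.take (k + 1)).reverse = messages.drop (messages.length - 1 - k) := by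
      rw [List.take_reverse]; simp [hj]
    simp only [Option.map_some, Bool.not_true, Bool.false_eq_true, if_false,
      List.reverse_append, List.reverse_cons]
    rw [h1, h2]
    simp
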